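-- pv_equiv track=rewrite | github.com/starrycw/CAC-DyShielding | PythonProject/PATCAC_LJP/PATCAC_Codec.py | getPATSeq
-- ===== SOURCE A (Python) =====
-- def getPATSeq(seq_length):
--     assert (isinstance(seq_length, int) and (seq_length > 2))
--     pat_list = [1, 2]
--     maxdata = 2
--     for i in range(2, seq_length):
--         element_next = pat_list[i - 2] * 3
--         pat_list.append(element_next)
--     if seq_length % 2 == 0:
--         maxdata = pat_list[-1] + pat_list[-2] - 1
--     elif seq_length % 2 == 1:
--         maxdata = pat_list[-1] + pat_list[-2] + pat_list[-3] - 1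
--     return tuple(pat_list), maxdata
-- ===== SOURCE B (Python) =====
-- def getPATSeq(seq_length):
--     assert (isinstance(seq_length, int) and (seq_length > 2))
--     # closed form: element i is 3**(i//2), doubled for odd i
--     pat = tuple((2 if i % 2 else 1) * 3 ** (i // 2) for i in range(seq_length))
--     if seq_length % 2 == 0:
--         maxdata = 3 ** (seq_length // 2) - 1
--     else:
--         maxdata = 2 * 3 ** ((seq_length - 1) // 2) - 1
--     return pat, maxdata
-- ===== Notes on version B (the rewrite author's own statement) =====
-- stated objective: idiomatic
-- what changed: Replaces the two-back iterative recurrence with a direct closed form per index (3**(i//2), doubled for odd i) built by a comprehension, and computes maxdata by closed formulas (3**(n//2)-1 for even n, 2*3**((n-1)//2)-1 for odd n) instead of reading back the last two or three elements.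
import Mathlib
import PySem

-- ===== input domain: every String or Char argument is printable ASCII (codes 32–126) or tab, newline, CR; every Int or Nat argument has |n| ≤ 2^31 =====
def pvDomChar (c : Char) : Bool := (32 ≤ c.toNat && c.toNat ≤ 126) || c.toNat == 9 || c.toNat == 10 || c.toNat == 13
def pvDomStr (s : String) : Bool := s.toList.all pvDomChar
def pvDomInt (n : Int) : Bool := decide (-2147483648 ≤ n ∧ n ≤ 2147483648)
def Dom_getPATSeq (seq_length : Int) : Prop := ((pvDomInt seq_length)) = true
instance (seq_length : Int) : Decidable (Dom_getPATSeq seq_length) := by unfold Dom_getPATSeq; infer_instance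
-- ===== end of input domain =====

-- B replaces A's two-back iterative recurrence by a per-index closed form (3^(i//2), doubled for odd i)
-- and computes maxdata by closed formulas instead of reading the last list elements; objective: idiomatic.


-- ===== PORT A =====
-- Literal transliteration of A. Indexing pat_list[i-2] / pat_list[-1] / [-2] / [-3] uses pyGetD with
-- default 0: under Pre_ (seq_length > 2) every such index is in range, so the default is never used.
def getPATSeq (seq_length : Int) : List Int × Int :=
  let pat_list : List Int := [1, 2]
  let pat_list : List Int :=
    (PySem.List.pyRange 2 seq_length 1).foldl
      (fun acc i => acc ++ [PySem.List.pyGetD acc (i - 2) 0 * 3]) pat_list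
  let maxdata : Int :=
    if PySem.Int.mod seq_length 2 = 0 then
      PySem.List.pyGetD pat_list (-1) 0 + PySem.List.pyGetD pat_list (-2) 0 - 1
    else if PySem.Int.mod seq_length 2 = 1 then
      PySem.List.pyGetD pat_list (-1) 0 + PySem.List.pyGetD pat_list (-2) 0
        + PySem.List.pyGetD pat_list (-3) 0 - 1
    else 2
  (pat_list, maxdata)

-- ===== PORT B =====
-- Transliteration of Source B. Python's 3 ** e has e = i//2 ≥ 0 for every i produced by range(seq_length)
-- and e = seq_length//2 ≥ 0 (resp. (seq_length-1)//2 ≥ 0) under Pre_, so `.toNat` is exact there.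
def getPATSeq_alt (seq_length : Int) : List Int × Int :=
  let pat : List Int :=
    (PySem.List.pyRange 0 seq_length 1).map
      (fun i => (if PySem.Int.mod i 2 ≠ 0 then 2 else 1) * 3 ^ (PySem.Int.floordiv i 2).toNat)
  let maxdata : Int :=
    if PySem.Int.mod seq_length 2 = 0 then
      3 ^ (PySem.Int.floordiv seq_length 2).toNat - 1
    else
      2 * 3 ^ (PySem.Int.floordiv (seq_length - 1) 2).toNat - 1
  (pat, maxdata)

-- ===== PRECONDITION & SPEC =====
-- A's assert rejects seq_length ≤ 2 (AssertionError); Pre_ is exactly the inputs A accepts.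
def Pre_getPATSeq (seq_length : Int) : Prop := 2 < seq_length
instance (seq_length : Int) : Decidable (Pre_getPATSeq seq_length) := by unfold Pre_getPATSeq; infer_instance
def pvWitness_getPATSeq : Int := 5

def Spec_getPATSeq (seq_length : Int) (out : List Int × Int) : Prop := out = getPATSeq_alt seq_length
instance (seq_length : Int) (out : List Int × Int) : Decidable (Spec_getPATSeq seq_length out) := by unfold Spec_getPATSeq; infer_instance

-- ===== CLAIM (what is proved, stated in full; the proofs are below) =====
def Claim_equal_getPATSeq : Prop := ∀ (seq_length : Int), Dom_getPATSeq seq_length → Pre_getPATSeq seq_length → Spec_getPATSeq seq_length (getPATSeq seq_length)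

-- ===== LEMMAS AND PROOFS =====

-- closed form of the i-th pattern element
def cf (i : Nat) : Int := (if i % 2 = 1 then 2 else 1) * 3 ^ (i / 2)

lemma cf_add_two (k : Nat) : cf (k + 2) = cf k * 3 := by
  unfold cf
  have h1 : (k + 2) % 2 = k % 2 := by omega
  have h2 : (k + 2) / 2 = k / 2 + 1 := by omega
  rw [h1, h2, pow_succ]; ring

-- A's loop builds the closed-form list
lemma loopA (k : Nat) :
    (PySem.List.pyRange 2 (2 + (k : Int)) 1).foldl
      (fun acc i => acc ++ [PySem.List.pyGetD acc (i - 2) 0 * 3]) [1, 2]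
    = (List.range (2 + k)).map cf := by
  induction k with
  | zero => simp [PySem.List.pyRange_one_eq_nil]; decide
  | succ k ih =>
    have hsplit : (2 + ((k : Int) + 1)) = (2 + (k : Int)) + 1 := by ring
    rw [show ((k + 1 : Nat) : Int) = (k : Int) + 1 by push_cast; ring, hsplit,
      PySem.List.pyRange_one_succ_right (by omega), List.foldl_append]
    rw [ih]
    have hlen : ((List.range (2 + k)).map cf).length = 2 + k := by simp
    have hidx : PySem.List.pyGetD ((List.range (2 + k)).map cf) ((2 + (k : Int)) - 2) 0 = cf k := by
      have : (2 + (k : Int)) - 2 = (k : Int) := by ring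
      rw [this, PySem.List.pyGetD_natCast]
      simp [List.getD_eq_getElem?_getD, show k < 2 + k by omega]
    simp only [List.foldl_cons, List.foldl_nil, hidx]
    rw [← cf_add_two, show 2 + (k + 1) = (2 + k) + 1 by ring, List.range_succ, List.map_append]
    simp [show k + 2 = 2 + k by ring]

-- B's comprehension builds the same closed-form list
lemma mapB (m : Nat) :
    (PySem.List.pyRange 0 (m : Int) 1).map
      (fun i => (if PySem.Int.mod i 2 ≠ 0 then 2 else 1) * 3 ^ (PySem.Int.floordiv i 2).toNat)
    = (List.range m).map cf := by
  rw [PySem.List.pyRange_zero_natCast]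
  rw [List.map_map]
  apply List.map_congr_left
  intro k _
  have hmod : PySem.Int.mod (k : Int) 2 = ((k % 2 : Nat) : Int) := by
    rw [PySem.Int.mod_eq_emod_of_pos (by norm_num)]; omega
  have hdiv : (PySem.Int.floordiv (k : Int) 2).toNat = k / 2 := by
    rw [PySem.Int.floordiv_eq_ediv_of_pos (by norm_num)]; omega
  simp only [Function.comp_apply, hmod, hdiv]
  unfold cf
  rcases Nat.mod_two_eq_zero_or_one k with h | h <;> simp [h]

lemma cf_nonneg_list (m : Nat) : ((List.range m).map cf).length = m := by simp

theorem getPATSeq_spec : Claim_equal_getPATSeq := by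
  intro n _ hpre
  unfold Pre_getPATSeq at hpre
  unfold Spec_getPATSeq getPATSeq getPATSeq_alt
  -- name m = n.toNat ≥ 3
  obtain ⟨m, rfl⟩ : ∃ m : Nat, n = (m : Int) := ⟨n.toNat, (Int.toNat_of_nonneg (by omega)).symm⟩
  have hm : 3 ≤ m := by exact_mod_cast hpre
  -- the lists agree
  have hlist :
      (PySem.List.pyRange 2 (m : Int) 1).foldl
        (fun acc i => acc ++ [PySem.List.pyGetD acc (i - 2) 0 * 3]) [1, 2]
      = (List.range m).map cf := by
    have := loopA (m - 2)
    rw [show (2 + ((m - 2 : Nat) : Int)) = (m : Int) by omega,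
        show 2 + (m - 2) = m by omega] at this
    exact this
  simp only [hlist, mapB]
  -- the maxdata values agree
  congr 1
  have hlen : ((List.range m).map cf).length = m := cf_nonneg_list m
  have g1 : PySem.List.pyGetD ((List.range m).map cf) (-1) 0 = cf (m - 1) := by
    rw [PySem.List.pyGetD_neg_ofNat _ 1 0 (by omega) (by omega)]
    simp [hlen]
  have g2 : PySem.List.pyGetD ((List.range m).map cf) (-2) 0 = cf (m - 2) := by
    rw [PySem.List.pyGetD_neg_ofNat _ 2 0 (by omega) (by omega)]
    simp [hlen]
  have g3 : PySem.List.pyGetD ((List.range m).map cf) (-3) 0 = cf (m - 3) := by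
    rw [PySem.List.pyGetD_neg_ofNat _ 3 0 (by omega) (by omega)]
    simp [hlen]
  rw [g1, g2, g3]
  rcases Nat.mod_two_eq_zero_or_one m with hpar | hpar
  · -- even
    have hmod : PySem.Int.mod (m : Int) 2 = 0 := by
      rw [PySem.Int.mod_eq_emod_of_pos (by norm_num)]; omega
    have hdiv : (PySem.Int.floordiv (m : Int) 2).toNat = m / 2 := by
      rw [PySem.Int.floordiv_eq_ediv_of_pos (by norm_num)]; omega
    rw [if_pos hmod, if_pos hmod, hdiv]
    unfold cf
    have e1 : (m - 1) % 2 = 1 := by omega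
    have e2 : (m - 2) % 2 = 0 := by omega
    have e3 : (m - 1) / 2 = m / 2 - 1 := by omega
    have e4 : (m - 2) / 2 = m / 2 - 1 := by omega
    rw [e1, e2, e3, e4]
    have hp : (3 : Int) ^ (m / 2) = 3 ^ (m / 2 - 1) * 3 := by
      rw [← pow_succ]; congr 1; omega
    simp [hp]; ring
  · -- odd
    have hmod : PySem.Int.mod (m : Int) 2 = 1 := by
      rw [PySem.Int.mod_eq_emod_of_pos (by norm_num)]; omega
    have hdiv : (PySem.Int.floordiv ((m : Int) - 1) 2).toNat = (m - 1) / 2 := by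
      rw [PySem.Int.floordiv_eq_ediv_of_pos (by norm_num)]; omega
    rw [if_neg (by rw [hmod]; norm_num), if_pos hmod, if_neg (by rw [hmod]; norm_num), hdiv]
    unfold cf
    have e1 : (m - 1) % 2 = 0 := by omega
    have e2 : (m - 2) % 2 = 1 := by omega
    have e3 : (m - 3) % 2 = 0 := by omega
    have e4 : (m - 1) / 2 = (m - 3) / 2 + 1 := by omega
    have e5 : (m - 2) / 2 = (m - 3) / 2 := by omega
    rw [e1, e2, e3, e4, e5]
    have hp : (3 : Int) ^ ((m - 3) / 2 + 1) = 3 ^ ((m - 3) / 2) * 3 := pow_succ 3 _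
    simp [hp]; ring
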